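-- pv_equiv track=rewrite | github.com/Jordan-Sun/simulated-chem | greedy.py | swap_columns
-- ===== SOURCE A (Python) =====
-- from typing import List, Tuple
--
-- def swap_columns(
--         setA: List[Tuple[int, int]], setB: List[Tuple[int, int]]
-- ) -> Tuple[List[int], List[int]]:
--     # Convert to pairs
--     N = len(setA)
--     pairs = list(zip(setA, setB))  # Each pair is ((idA, valA), (idB, valB))
--
--     # Convert the float values to integers
--     differences = []
--     total_diff = 0
--     for (idA, valA), (idB, valB) in pairs:
--         valA_int = int(valA)
--         valB_int = int(valB)
--         diff = valA_int - valB_int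
--         differences.append(diff)
--         total_diff += abs(diff)
--
--     # Initialize the DP table
--     dp = [{} for _ in range(N + 1)]  # dp[i][s] = (prev_s, choice)
--     dp[0][0] = None  # Starting point
--
--     # Build the DP table
--     for i in range(1, N + 1):
--         di = differences[i - 1]
--         dp_i = dp[i]
--         dp_prev = dp[i - 1]
--         for s in dp_prev:
--             # Option 1: Assign di with +1 (valA to set A, valB to set B)
--             s_new = s + di
--             if s_new not in dp_i:
--                 dp_i[s_new] = (s, "+")
--             # Option 2: Assign di with -1 (valA to set B, valB to set A)
--             s_new_neg = s - di
--             if s_new_neg not in dp_i: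
--                 dp_i[s_new_neg] = (s, "-")
--
--     # Find the minimal absolute sum
--     min_abs_sum = None
--     target_s = None
--     for s in dp[N]:
--         abs_s = abs(s)
--         if min_abs_sum is None or abs_s < min_abs_sum:
--             min_abs_sum = abs_s
--             target_s = s
--
--     # Reconstruct the solution
--     ids_setA = []
--     ids_setB = []
--     s = target_s
--     for i in range(N, 0, -1):
--         prev_s, sign = dp[i][s]
--         ((idA, valA), (idB, valB)) = pairs[i - 1]
--         if sign == "+":
--             # valA to set A, valB to set B
--             ids_setA.append(idA)
--             ids_setB.append(idB)
--         else:
--             # valA to set B, valB to set A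
--             ids_setA.append(idB)
--             ids_setB.append(idA)
--         s = prev_s  # Move to the previous state
--
--     # Reverse the IDs to correct the order
--     ids_setA.reverse()
--     ids_setB.reverse()
--
--     return ids_setA, ids_setB
-- ===== SOURCE B (Python) =====
-- from typing import List, Tuple
--
-- def swap_columns(
--         setA: List[Tuple[int, int]], setB: List[Tuple[int, int]]
-- ) -> Tuple[List[int], List[int]]:
--     # Single forward DP pass: each reachable signed sum maps to the concrete
--     # (ids_setA, ids_setB) assignment reaching it; no backpointers, no reconstruction.
--     states = {0: ([], [])}
--     for (idA, valA), (idB, valB) in zip(setA, setB):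
--         d = int(valA) - int(valB)
--         new_states = {}
--         for s, (ia, ib) in states.items():
--             if s + d not in new_states:
--                 new_states[s + d] = (ia + [idA], ib + [idB])
--             if s - d not in new_states:
--                 new_states[s - d] = (ia + [idB], ib + [idA])
--         states = new_states
--     best = None
--     for s, assignment in states.items():
--         if best is None or abs(s) < best[0]:
--             best = (abs(s), assignment)
--     return best[1]
-- ===== Notes on version B (the rewrite author's own statement) =====
-- stated objective: alternative
-- what changed: Instead of A's three-phase build-backpointers / find-min / backward-reconstruct-then-reverse, B keeps a single rolling dict mapping each reachable signed sum directly to the concrete (ids_setA, ids_setB) assignment reaching it, so the answer is read off the best state in one forward pass with no dp table, no backpointers and no reconstruction loop.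
import Mathlib
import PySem

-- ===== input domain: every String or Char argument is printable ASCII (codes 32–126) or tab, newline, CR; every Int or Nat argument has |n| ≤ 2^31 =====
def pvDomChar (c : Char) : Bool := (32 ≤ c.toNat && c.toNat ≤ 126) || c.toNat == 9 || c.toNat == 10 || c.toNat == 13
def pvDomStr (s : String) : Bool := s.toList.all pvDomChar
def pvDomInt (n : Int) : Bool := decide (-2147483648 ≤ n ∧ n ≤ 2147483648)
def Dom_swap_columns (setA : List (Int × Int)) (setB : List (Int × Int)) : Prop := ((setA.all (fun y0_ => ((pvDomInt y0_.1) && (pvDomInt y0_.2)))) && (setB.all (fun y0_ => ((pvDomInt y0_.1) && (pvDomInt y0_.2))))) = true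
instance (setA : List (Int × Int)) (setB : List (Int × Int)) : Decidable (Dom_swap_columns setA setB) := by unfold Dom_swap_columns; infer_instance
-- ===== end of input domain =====

-- B replaces A's backpointer dp table + backward reconstruction by one rolling dict from each
-- reachable signed sum to the id lists reaching it (objective: alternative decomposition).
-- ===== PORT A =====

-- one step of A's dp build: iterate dp_prev's keys, conditionally insert s+di / s-di with backpointers
def swapStepA (dprev : PySem.Dict Int (Option (Int × String))) (di : Int) :
    PySem.Dict Int (Option (Int × String)) :=
  dprev.keys.foldl (fun dpi s =>
    let dpi := if !(dpi.contains (s + di)) then dpi.insert (s + di) (some (s, "+")) else dpi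
    if !(dpi.contains (s - di)) then dpi.insert (s - di) (some (s, "-")) else dpi)
    PySem.Dict.empty

-- A's reconstruction loop (i = N..1): read dp[i][s], append the ids, move to prev_s.
-- The history list holds (dp[i], pairs[i-1]) for i = N..1.  Python raises KeyError /
-- unpacks None if the lookup fails; that is unreachable for A (backpointers always exist).
def swapLoopA : List ((PySem.Dict Int (Option (Int × String))) × ((Int × Int) × (Int × Int))) →
    Int → List Int → List Int → List Int × List Int
  | [], _, a, b => (a, b)
  | (d, pr) :: rest, s, a, b =>
    match d.get? s with
    | some (some pv) =>
      if pv.2 == "+" then swapLoopA rest pv.1 (a ++ [pr.1.1]) (b ++ [pr.2.1])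
      else swapLoopA rest pv.1 (a ++ [pr.2.1]) (b ++ [pr.1.1])
    | _ => (a, b)

def swap_columns (setA : List (Int × Int)) (setB : List (Int × Int)) : List Int × List Int :=
  let pairs := setA.zip setB
  -- differences list and (unused) total_diff accumulator
  let dt := pairs.foldl (fun (acc : List Int × Int) p =>
      let diff := p.1.2 - p.2.2
      (acc.1 ++ [diff], acc.2 + |diff|)) ([], 0)
  let differences := dt.1
  let d0 : PySem.Dict Int (Option (Int × String)) := PySem.Dict.empty.insert 0 none
  -- build dp[1..N]; keep (dp[i], pairs[i-1]) history, latest first, for the reconstruction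
  let built := (pairs.zip differences).foldl
      (fun (st : (PySem.Dict Int (Option (Int × String))) ×
                 List ((PySem.Dict Int (Option (Int × String))) × ((Int × Int) × (Int × Int)))) pd =>
        let dnew := swapStepA st.1 pd.2
        (dnew, (dnew, pd.1) :: st.2)) (d0, [])
  -- find the minimal absolute sum (first strictly smaller wins)
  let sel := built.1.keys.foldl (fun (st : Option Int × Option Int) s =>
      match st.1 with
      | none => (some |s|, some s)
      | some m => if |s| < m then (some |s|, some s) else st) (none, none)
  match sel.2 with
  | some t =>
    let r := swapLoopA built.2 t [] []
    (r.1.reverse, r.2.reverse)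
  | none => ([], [])   -- unreachable: dp[N] is never empty (Python would raise here)

-- ===== PORT B =====

-- one step of B: rebuild the rolling dict, storing the extended id lists directly
def swapStepB (db : PySem.Dict Int (List Int × List Int)) (pr : (Int × Int) × (Int × Int)) :
    PySem.Dict Int (List Int × List Int) :=
  let d := pr.1.2 - pr.2.2
  db.items.foldl (fun nb q =>
    let nb := if !(nb.contains (q.1 + d)) then
        nb.insert (q.1 + d) (q.2.1 ++ [pr.1.1], q.2.2 ++ [pr.2.1]) else nb
    if !(nb.contains (q.1 - d)) then
        nb.insert (q.1 - d) (q.2.1 ++ [pr.2.1], q.2.2 ++ [pr.1.1]) else nb)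
    PySem.Dict.empty

def swap_columns_alt (setA : List (Int × Int)) (setB : List (Int × Int)) : List Int × List Int :=
  let states := (setA.zip setB).foldl swapStepB (PySem.Dict.empty.insert 0 ([], []))
  let best := states.items.foldl
      (fun (st : Option (Int × (List Int × List Int))) q =>
        match st with
        | none => some (|q.1|, q.2)
        | some m => if |q.1| < m.1 then some (|q.1|, q.2) else st) none
  match best with
  | some m => m.2
  | none => ([], [])

-- ===== PRECONDITION & SPEC =====
-- Pre_ excludes exactly the inputs where A raises: if setA is longer than setB,
-- A's dp loop indexes past the end of the (zip-truncated) differences list (IndexError).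
def Pre_swap_columns (setA : List (Int × Int)) (setB : List (Int × Int)) : Prop :=
  setA.length ≤ setB.length
instance (setA : List (Int × Int)) (setB : List (Int × Int)) : Decidable (Pre_swap_columns setA setB) := by unfold Pre_swap_columns; infer_instance
def pvWitness_swap_columns : (List (Int × Int)) × (List (Int × Int)) := ([(1, 3)], [(2, 1)])

def Spec_swap_columns (setA : List (Int × Int)) (setB : List (Int × Int)) (out : List Int × List Int) : Prop := out = swap_columns_alt setA setB
instance (setA : List (Int × Int)) (setB : List (Int × Int)) (out : List Int × List Int) : Decidable (Spec_swap_columns setA setB out) := by unfold Spec_swap_columns; infer_instance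

-- ===== CLAIM (what is proved, stated in full; the proofs are below) =====
def Claim_equal_swap_columns : Prop := ∀ (setA : List (Int × Int)) (setB : List (Int × Int)), Dom_swap_columns setA setB → Pre_swap_columns setA setB → Spec_swap_columns setA setB (swap_columns setA setB)

-- ===== LEMMAS AND PROOFS =====

-- A's reconstruction, without the accumulators, in backward (pre-reverse) order
def swapBwd : List ((PySem.Dict Int (Option (Int × String))) × ((Int × Int) × (Int × Int))) →
    Int → List Int × List Int
  | [], _ => ([], [])
  | (d, pr) :: rest, s =>
    match d.get? s with
    | some (some pv) =>
      let r := swapBwd rest pv.1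
      if pv.2 == "+" then (pr.1.1 :: r.1, pr.2.1 :: r.2) else (pr.2.1 :: r.1, pr.1.1 :: r.2)
    | _ => ([], [])

-- A's reconstruction in final (forward) order
def swapFwd (hist : List ((PySem.Dict Int (Option (Int × String))) × ((Int × Int) × (Int × Int))))
    (s : Int) : List Int × List Int :=
  ((swapBwd hist s).1.reverse, (swapBwd hist s).2.reverse)

-- what the forward value becomes, given the stored dp cell
def swapValF (hist : List ((PySem.Dict Int (Option (Int × String))) × ((Int × Int) × (Int × Int))))
    (pr : (Int × Int) × (Int × Int)) : Option (Int × String) → List Int × List Int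
  | some pv =>
      if pv.2 == "+" then ((swapFwd hist pv.1).1 ++ [pr.1.1], (swapFwd hist pv.1).2 ++ [pr.2.1])
      else ((swapFwd hist pv.1).1 ++ [pr.2.1], (swapFwd hist pv.1).2 ++ [pr.1.1])
  | none => ([], [])

theorem swapLoopA_eq (hist : List ((PySem.Dict Int (Option (Int × String))) × ((Int × Int) × (Int × Int)))) : ∀ (s : Int) (a b : List Int),
    swapLoopA hist s a b = (a ++ (swapBwd hist s).1, b ++ (swapBwd hist s).2) := by
  induction hist with
  | nil => intro s a b; simp [swapLoopA, swapBwd]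
  | cons hd rest ih =>
    intro s a b
    obtain ⟨d, pr⟩ := hd
    simp only [swapLoopA, swapBwd]
    cases h : d.get? s with
    | none => simp
    | some v =>
      cases v with
      | none => simp
      | some pv =>
        by_cases hs : pv.2 == "+"
        · simp [hs, ih]
        · simp [hs, ih]

theorem swapFwd_cons {d : PySem.Dict Int (Option (Int × String))} {s : Int}
    {v : Option (Int × String)} (pr : (Int × Int) × (Int × Int))
    (hist : List ((PySem.Dict Int (Option (Int × String))) × ((Int × Int) × (Int × Int))))
    (h : d.get? s = some v) :
    swapFwd ((d, pr) :: hist) s = swapValF hist pr v := by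
  cases v with
  | none => simp [swapFwd, swapBwd, swapValF, h]
  | some pv =>
    by_cases hs : pv.2 == "+"
    · simp [swapFwd, swapBwd, swapValF, h, hs]
    · simp [swapFwd, swapBwd, swapValF, h, hs]

theorem swapStepA_nodup_aux (di : Int) : ∀ (l : List Int)
    (d : PySem.Dict Int (Option (Int × String))), d.keys.Nodup →
    (l.foldl (fun dpi s =>
      let dpi := if !(dpi.contains (s + di)) then dpi.insert (s + di) (some (s, "+")) else dpi
      if !(dpi.contains (s - di)) then dpi.insert (s - di) (some (s, "-")) else dpi) d).keys.Nodup := by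
  intro l
  induction l with
  | nil => intro d hd; simpa using hd
  | cons x t ih =>
    intro d hd
    simp only [List.foldl_cons]
    apply ih
    split <;> split <;>
      first
        | exact PySem.Dict.nodup_keys_insert _ _ _ (PySem.Dict.nodup_keys_insert _ _ _ hd)
        | exact PySem.Dict.nodup_keys_insert _ _ _ hd
        | exact hd

theorem swapStepA_nodup (da : PySem.Dict Int (Option (Int × String))) (di : Int) :
    (swapStepA da di).keys.Nodup := by
  unfold swapStepA
  exact swapStepA_nodup_aux di da.keys PySem.Dict.empty PySem.Dict.nodup_keys_empty

-- same keys ⇒ same contains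
theorem swapContains_eq {na : PySem.Dict Int (Option (Int × String))}
    {nb : PySem.Dict Int (List Int × List Int)} {f : Int × Option (Int × String) → List Int × List Int}
    (hrel : nb.items = na.items.map (fun p => (p.1, f p))) (k : Int) :
    nb.contains k = na.contains k := by
  rw [PySem.Dict.contains_eq_decide_mem_keys, PySem.Dict.contains_eq_decide_mem_keys]
  have : nb.keys = na.keys := by
    show nb.items.map (·.1) = na.items.map (·.1)
    rw [hrel, List.map_map]
    rfl
  rw [this]

-- one conditional insert preserves the item-level correspondence
theorem swapCondInsert_rel {na : PySem.Dict Int (Option (Int × String))}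
    {nb : PySem.Dict Int (List Int × List Int)}
    (hist : List ((PySem.Dict Int (Option (Int × String))) × ((Int × Int) × (Int × Int))))
    (pr : (Int × Int) × (Int × Int)) (k : Int) (w : Option (Int × String))
    (hrel : nb.items = na.items.map (fun p => (p.1, swapValF hist pr p.2))) :
    (if !(nb.contains k) then nb.insert k (swapValF hist pr w) else nb).items
      = (if !(na.contains k) then na.insert k w else na).items.map
          (fun p => (p.1, swapValF hist pr p.2)) := by
  rw [swapContains_eq hrel k]
  by_cases hc : na.contains k
  · simp [hc, hrel]
  · have hc' : na.contains k = false := by simpa using hc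
    simp only [hc', Bool.not_false, if_true]
    rw [PySem.Dict.items_insert_of_not_contains na _ hc',
        PySem.Dict.items_insert_of_not_contains nb _ (by rw [swapContains_eq hrel k]; exact hc')]
    simp [hrel]

theorem swapFold_rel
    (hist : List ((PySem.Dict Int (Option (Int × String))) × ((Int × Int) × (Int × Int))))
    (pr : (Int × Int) × (Int × Int)) (di : Int) :
    ∀ (L : List (Int × (List Int × List Int)))
      (na : PySem.Dict Int (Option (Int × String)))
      (nb : PySem.Dict Int (List Int × List Int)),
      nb.items = na.items.map (fun p => (p.1, swapValF hist pr p.2)) →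
      (∀ q ∈ L, q.2 = swapFwd hist q.1) →
      (L.foldl (fun nb q =>
          let nb := if !(nb.contains (q.1 + di)) then
              nb.insert (q.1 + di) (q.2.1 ++ [pr.1.1], q.2.2 ++ [pr.2.1]) else nb
          if !(nb.contains (q.1 - di)) then
              nb.insert (q.1 - di) (q.2.1 ++ [pr.2.1], q.2.2 ++ [pr.1.1]) else nb) nb).items
        = ((L.map (·.1)).foldl (fun dpi s =>
            let dpi := if !(dpi.contains (s + di)) then dpi.insert (s + di) (some (s, "+")) else dpi
            if !(dpi.contains (s - di)) then dpi.insert (s - di) (some (s, "-")) else dpi) na).items.map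
            (fun p => (p.1, swapValF hist pr p.2)) := by
  intro L
  induction L with
  | nil => intro na nb hrel _; simpa using hrel
  | cons q t ih =>
    intro na nb hrel hg
    have hq : q.2 = swapFwd hist q.1 := hg q (by simp)
    simp only [List.map_cons, List.foldl_cons]
    apply ih
    · have h1 := swapCondInsert_rel hist pr (q.1 + di) (some (q.1, "+")) hrel
      have hv1 : swapValF hist pr (some (q.1, "+")) = (q.2.1 ++ [pr.1.1], q.2.2 ++ [pr.2.1]) := by
        simp [swapValF, hq]
      rw [hv1] at h1
      have h2 := swapCondInsert_rel hist pr (q.1 - di) (some (q.1, "-")) h1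
      have hv2 : swapValF hist pr (some (q.1, "-")) = (q.2.1 ++ [pr.2.1], q.2.2 ++ [pr.1.1]) := by
        simp [swapValF, hq]
      rw [hv2] at h2
      exact h2
    · intro p hp; exact hg p (by simp [hp])

theorem swapStep_rel (da : PySem.Dict Int (Option (Int × String)))
    (db : PySem.Dict Int (List Int × List Int))
    (hist : List ((PySem.Dict Int (Option (Int × String))) × ((Int × Int) × (Int × Int))))
    (pr : (Int × Int) × (Int × Int))
    (hrel : db.items = da.items.map (fun p => (p.1, swapFwd hist p.1))) :
    (swapStepB db pr).items = (swapStepA da (pr.1.2 - pr.2.2)).items.map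
      (fun p => (p.1, swapFwd ((swapStepA da (pr.1.2 - pr.2.2), pr) :: hist) p.1)) := by
  have hmid : (swapStepB db pr).items = (swapStepA da (pr.1.2 - pr.2.2)).items.map
      (fun p => (p.1, swapValF hist pr p.2)) := by
    unfold swapStepB swapStepA
    have hkeys : db.items.map (·.1) = da.keys := by
      show db.items.map (·.1) = da.items.map (·.1)
      rw [hrel, List.map_map]; rfl
    rw [← hkeys]
    apply swapFold_rel hist pr (pr.1.2 - pr.2.2) db.items PySem.Dict.empty PySem.Dict.empty
    · rfl
    · intro q hq
      rw [hrel] at hq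
      obtain ⟨p, _, rfl⟩ := List.mem_map.mp hq
      rfl
  rw [hmid]
  apply List.map_congr_left
  intro p hp
  have hget : (swapStepA da (pr.1.2 - pr.2.2)).get? p.1 = some p.2 :=
    PySem.Dict.get?_of_mem_items _ hp (swapStepA_nodup da _)
  rw [swapFwd_cons pr hist hget]

theorem swapBuild_rel :
    ∀ (ps : List ((Int × Int) × (Int × Int)))
      (da : PySem.Dict Int (Option (Int × String)))
      (hist : List ((PySem.Dict Int (Option (Int × String))) × ((Int × Int) × (Int × Int))))
      (db : PySem.Dict Int (List Int × List Int)),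
      db.items = da.items.map (fun p => (p.1, swapFwd hist p.1)) →
      (ps.foldl swapStepB db).items =
        (ps.foldl (fun st p =>
            (swapStepA st.1 (p.1.2 - p.2.2), (swapStepA st.1 (p.1.2 - p.2.2), p) :: st.2))
          (da, hist)).1.items.map
          (fun q => (q.1, swapFwd
            (ps.foldl (fun st p =>
              (swapStepA st.1 (p.1.2 - p.2.2), (swapStepA st.1 (p.1.2 - p.2.2), p) :: st.2))
              (da, hist)).2 q.1)) := by
  intro ps
  induction ps with
  | nil => intro da hist db hrel; simpa using hrel
  | cons p t ih =>
    intro da hist db hrel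
    simp only [List.foldl_cons]
    exact ih _ _ _ (swapStep_rel da db hist p hrel)

theorem swapSel_rel (g : Int → List Int × List Int) :
    ∀ (ks : List Int) (stA : Option Int × Option Int)
      (stB : Option (Int × (List Int × List Int))),
      ((stA = (none, none) ∧ stB = none) ∨
        (∃ m t, stA = (some m, some t) ∧ stB = some (m, g t))) →
      (let rA := ks.foldl (fun (st : Option Int × Option Int) s =>
          match st.1 with
          | none => (some |s|, some s)
          | some m => if |s| < m then (some |s|, some s) else st) stA
       let rB := (ks.map (fun s => (s, g s))).foldl
          (fun (st : Option (Int × (List Int × List Int))) q =>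
            match st with
            | none => some (|q.1|, q.2)
            | some m => if |q.1| < m.1 then some (|q.1|, q.2) else st) stB
       (rA = (none, none) ∧ rB = none) ∨ ∃ m t, rA = (some m, some t) ∧ rB = some (m, g t)) := by
  intro ks
  induction ks with
  | nil => intro stA stB h; simpa using h
  | cons x l ih =>
    intro stA stB h
    simp only [List.map_cons, List.foldl_cons]
    rcases h with ⟨hA, hB⟩ | ⟨m, t, hA, hB⟩
    · subst hA; subst hB
      exact ih _ _ (Or.inr ⟨|x|, x, rfl, rfl⟩)
    · subst hA; subst hB
      by_cases hlt : |x| < m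
      · refine ih _ _ (Or.inr ⟨|x|, x, ?_, ?_⟩) <;> simp [hlt]
      · refine ih _ _ (Or.inr ⟨m, t, ?_, ?_⟩) <;> simp [hlt]

theorem swap_columns_spec : Claim_equal_swap_columns := by
  intro setA setB _ _
  unfold Spec_swap_columns swap_columns swap_columns_alt
  have hdiff : (List.foldl (fun (acc : List Int × Int) p =>
        (acc.1 ++ [p.1.2 - p.2.2], acc.2 + |p.1.2 - p.2.2|)) ([], 0) (setA.zip setB)).1
      = (setA.zip setB).map (fun p => p.1.2 - p.2.2) := by
    rw [PySem.List.foldl_prod_mk (fun l (p : (Int × Int) × (Int × Int)) => l ++ [p.1.2 - p.2.2])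
        (fun t (p : (Int × Int) × (Int × Int)) => t + |p.1.2 - p.2.2|)]
    show List.foldl (fun acc p => acc ++ [p.1.2 - p.2.2]) [] (setA.zip setB) = _
    rw [PySem.List.foldl_append_singleton_eq_map]
    exact List.nil_append _
  simp only [hdiff]
  rw [show (setA.zip setB).zip ((setA.zip setB).map (fun p => p.1.2 - p.2.2))
        = (setA.zip setB).map (fun p => (p, p.1.2 - p.2.2)) from by
      simpa using (List.zip_map' (f := id) (g := fun p => p.1.2 - p.2.2) (l := setA.zip setB))]
  rw [List.foldl_map]
  simp only []
  set P := (setA.zip setB).foldl (fun st p =>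
      (swapStepA st.1 (p.1.2 - p.2.2), (swapStepA st.1 (p.1.2 - p.2.2), p) :: st.2))
      ((PySem.Dict.empty.insert 0 none : PySem.Dict Int (Option (Int × String))),
       ([] : List ((PySem.Dict Int (Option (Int × String))) × ((Int × Int) × (Int × Int))))) with hP
  have hb : (List.foldl swapStepB (PySem.Dict.empty.insert 0 ([], [])) (setA.zip setB)).items
      = P.1.items.map (fun q => (q.1, swapFwd P.2 q.1)) := by
    rw [hP]
    exact swapBuild_rel (setA.zip setB) _ [] _ (by rfl)
  have hkeys : P.1.items.map (fun q => (q.1, swapFwd P.2 q.1))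
      = P.1.keys.map (fun s => (s, swapFwd P.2 s)) := by
    have h : P.1.keys = P.1.items.map (·.1) := rfl
    rw [h, List.map_map]
    rfl
  rw [hb, hkeys]
  have hsel := swapSel_rel (swapFwd P.2) P.1.keys (none, none) none (Or.inl ⟨rfl, rfl⟩)
  simp only at hsel
  rcases hsel with ⟨h1, h2⟩ | ⟨m, t, h1, h2⟩
  · rw [h1, h2]
  · rw [h1, h2]
    simp only [swapLoopA_eq, List.nil_append]
    rfl
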